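-- pv_equiv track=rewrite | github.com/qgzm/LeetCode | demo6/demo4/672.灯泡开关二.py | flipLights
-- ===== SOURCE A (Python) =====
-- def flipLights(n: int, presses: int) -> int:
--     seen = set()
--     for i in range(2 ** 4):
--         pressArr = [(i >> j) & 1 for j in range(4)]
--         # pressArr表示四个按钮的按动情况
--         # 整数status表示四组灯泡亮灭的状态
--         if sum(pressArr) % 2 == presses % 2 and sum(pressArr) <= presses:
--             status = pressArr[0] ^ pressArr[1] ^ pressArr[3]
--             if n >= 2:
--                 status |= (pressArr[0] ^ pressArr[1]) << 1
--             if n >= 3: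
--                 status |= (pressArr[0] ^ pressArr[2]) << 2
--             if n >= 4:
--                 status |= (pressArr[0] ^ pressArr[1] ^ pressArr[3]) << 3
--             seen.add(status)
--     return len(seen)
-- ===== SOURCE B (Python) =====
-- def flipLights(n: int, presses: int) -> int:
--     if presses < 0:
--         return 0
--     if presses == 0:
--         return 1
--     e = max(1, min(n, 3))
--     if e == 1:
--         return 2
--     if e == 2:
--         return 3 if presses == 1 else 4
--     return 4 if presses == 1 else 7 if presses == 2 else 8
-- ===== Notes on version B (the rewrite author's own statement) =====
-- stated objective: faster
-- what changed: Replaces the 16-subset enumeration with a deduplicating set by a closed-form constant case analysis on the effective bulb count min(max(n,1),3) and the presses bucket (0, 1, 2, >=3).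
import Mathlib
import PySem

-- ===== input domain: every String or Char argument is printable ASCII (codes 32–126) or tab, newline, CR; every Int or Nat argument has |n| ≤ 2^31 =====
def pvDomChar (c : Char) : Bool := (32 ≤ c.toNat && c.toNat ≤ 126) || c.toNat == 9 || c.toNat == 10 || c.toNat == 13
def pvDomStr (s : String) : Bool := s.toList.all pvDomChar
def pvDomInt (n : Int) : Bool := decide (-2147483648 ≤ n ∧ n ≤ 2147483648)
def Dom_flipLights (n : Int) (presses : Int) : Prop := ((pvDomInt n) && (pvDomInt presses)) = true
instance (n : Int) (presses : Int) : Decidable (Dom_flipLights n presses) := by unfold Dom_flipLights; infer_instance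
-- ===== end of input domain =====

-- B replaces A's 16-subset enumeration + dedup set with a closed-form constant case analysis (objective: constant-factor mechanism — no loop, no set; timing below measurement resolution).

-- ===== PORT A =====
-- Literal port of A: enumerate i in range(16), build pressArr of the 4 button-press bits,
-- filter by parity and count, accumulate the resulting status in a set, return its size.
-- All Python ints here are nonnegative, so bits/status are carried as Nat (exact).
def flipLights (n : Int) (presses : Int) : Int :=
  let seen : PySem.Set Nat :=
    (List.range 16).foldl (fun seen i =>
      let pressArr : List Nat := (List.range 4).map (fun j => (i >>> j) &&& 1)
      if PySem.Int.mod (pressArr.sum : Int) 2 = PySem.Int.mod presses 2 ∧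
          (pressArr.sum : Int) ≤ presses then
        let status0 := (pressArr.getD 0 0) ^^^ (pressArr.getD 1 0) ^^^ (pressArr.getD 3 0)
        let status1 := if 2 ≤ n then status0 ||| (((pressArr.getD 0 0) ^^^ (pressArr.getD 1 0)) <<< 1) else status0
        let status2 := if 3 ≤ n then status1 ||| (((pressArr.getD 0 0) ^^^ (pressArr.getD 2 0)) <<< 2) else status1
        let status3 := if 4 ≤ n then status2 ||| (((pressArr.getD 0 0) ^^^ (pressArr.getD 1 0) ^^^ (pressArr.getD 3 0)) <<< 3) else status2
        PySem.Set.add seen status3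
      else seen) PySem.Set.empty
  PySem.Set.len seen

-- ===== PORT B =====
def flipLights_alt (n : Int) (presses : Int) : Int :=
  if presses < 0 then 0
  else if presses = 0 then 1
  else
    let e := max 1 (min n 3)
    if e = 1 then 2
    else if e = 2 then (if presses = 1 then 3 else 4)
    else if presses = 1 then 4
    else if presses = 2 then 7
    else 8

-- ===== PRECONDITION & SPEC =====
def Spec_flipLights (n : Int) (presses : Int) (out : Int) : Prop := out = flipLights_alt n presses
instance (n : Int) (presses : Int) (out : Int) : Decidable (Spec_flipLights n presses out) := by unfold Spec_flipLights; infer_instance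

-- ===== CLAIM (what is proved, stated in full; the proofs are below) =====
def Claim_equal_flipLights : Prop := ∀ (n : Int) (presses : Int), Dom_flipLights n presses → Spec_flipLights n presses (flipLights n presses)

-- ===== LEMMAS AND PROOFS =====

-- Canonical representatives: both programs only read n through the thresholds 2,3,4 and
-- presses through sign, parity, and comparisons with 0..4.
def pvNC (n : Int) : Int := if n ≤ 1 then 1 else min n 4
def pvPC (p : Int) : Int := if p < 0 then -1 else if p ≤ 4 then p else 4 + PySem.Int.mod p 2

lemma pvNC_cases (n : Int) : pvNC n = 1 ∨ pvNC n = 2 ∨ pvNC n = 3 ∨ pvNC n = 4 := by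
  unfold pvNC; split_ifs <;> omega

lemma pvPC_cases (p : Int) :
    pvPC p = -1 ∨ pvPC p = 0 ∨ pvPC p = 1 ∨ pvPC p = 2 ∨ pvPC p = 3 ∨ pvPC p = 4 ∨ pvPC p = 5 := by
  unfold pvPC
  simp only [PySem.Int.mod_eq_emod_of_pos (show (0:Int) < 2 by norm_num)]
  split_ifs <;> omega

lemma pvNC_two (n : Int) : (2 ≤ pvNC n) ↔ (2 ≤ n) := by unfold pvNC; split_ifs <;> omega
lemma pvNC_three (n : Int) : (3 ≤ pvNC n) ↔ (3 ≤ n) := by unfold pvNC; split_ifs <;> omega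
lemma pvNC_four (n : Int) : (4 ≤ pvNC n) ↔ (4 ≤ n) := by unfold pvNC; split_ifs <;> omega

lemma pvCond_pc (p : Int) (s : Nat) (hs : s ≤ 4) :
    (PySem.Int.mod (s : Int) 2 = PySem.Int.mod p 2 ∧ (s : Int) ≤ p) ↔
    (PySem.Int.mod (s : Int) 2 = PySem.Int.mod (pvPC p) 2 ∧ (s : Int) ≤ pvPC p) := by
  unfold pvPC
  simp only [PySem.Int.mod_eq_emod_of_pos (show (0:Int) < 2 by norm_num)]
  split_ifs <;> omega

lemma pvSum_le (i : Nat) :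
    ((List.range 4).map (fun j => (i >>> j) &&& 1)).sum ≤ 4 := by
  have h0 : (i >>> 0) &&& 1 ≤ 1 := Nat.and_le_right
  have h1 : (i >>> 1) &&& 1 ≤ 1 := Nat.and_le_right
  have h2 : (i >>> 2) &&& 1 ≤ 1 := Nat.and_le_right
  have h3 : (i >>> 3) &&& 1 ≤ 1 := Nat.and_le_right
  simp [List.range_succ]
  omega

-- A depends on (n, presses) only through the canonical representatives.
lemma flipLights_canon (n p : Int) : flipLights n p = flipLights (pvNC n) (pvPC p) := by
  unfold flipLights
  apply congrArg
  apply congrArg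
  apply PySem.List.foldl_congr_mem
  intro acc i _
  simp only
  have hiff := pvCond_pc p (((List.range 4).map (fun j => (i >>> j) &&& 1)).sum) (pvSum_le i)
  by_cases hc : PySem.Int.mod (((List.range 4).map (fun j => (i >>> j) &&& 1)).sum : Int) 2 = PySem.Int.mod p 2 ∧
      (((List.range 4).map (fun j => (i >>> j) &&& 1)).sum : Int) ≤ p
  · rw [if_pos hc, if_pos (hiff.mp hc)]
    by_cases h2 : (2:Int) ≤ n <;> by_cases h3 : (3:Int) ≤ n <;> by_cases h4 : (4:Int) ≤ n <;>
      simp [h2, h3, h4, pvNC_two, pvNC_three, pvNC_four]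
  · rw [if_neg hc, if_neg (fun hcc => hc (hiff.mpr hcc))]

lemma pvPC_lt0 (p : Int) : (pvPC p < 0) ↔ (p < 0) := by
  unfold pvPC
  simp only [PySem.Int.mod_eq_emod_of_pos (show (0:Int) < 2 by norm_num)]
  split_ifs <;> constructor <;> intro hq <;> omega

lemma pvPC_eq0 (p : Int) : (pvPC p = 0) ↔ (p = 0) := by
  unfold pvPC
  simp only [PySem.Int.mod_eq_emod_of_pos (show (0:Int) < 2 by norm_num)]
  split_ifs <;> constructor <;> intro hq <;> first | omega | exact absurd hq (by decide)

lemma pvPC_eq1 (p : Int) : (pvPC p = 1) ↔ (p = 1) := by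
  unfold pvPC
  simp only [PySem.Int.mod_eq_emod_of_pos (show (0:Int) < 2 by norm_num)]
  split_ifs <;> constructor <;> intro hq <;> first | omega | exact absurd hq (by decide)

lemma pvPC_eq2 (p : Int) : (pvPC p = 2) ↔ (p = 2) := by
  unfold pvPC
  simp only [PySem.Int.mod_eq_emod_of_pos (show (0:Int) < 2 by norm_num)]
  split_ifs <;> constructor <;> intro hq <;> first | omega | exact absurd hq (by decide)

lemma pvNC_min (n : Int) : max 1 (min (pvNC n) 3) = max 1 (min n 3) := by
  unfold pvNC; split_ifs <;> omega

-- B depends on (n, presses) only through the canonical representatives.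
lemma flipLights_alt_canon (n p : Int) : flipLights_alt n p = flipLights_alt (pvNC n) (pvPC p) := by
  simp only [flipLights_alt, pvPC_lt0, pvPC_eq0, pvPC_eq1, pvPC_eq2, pvNC_min]

-- ===== VERDICT (by name: the statement is the Claim_ definition above) =====
theorem flipLights_spec : Claim_equal_flipLights := by
  unfold Claim_equal_flipLights Spec_flipLights
  intro n p _
  rw [flipLights_canon n p, flipLights_alt_canon n p]
  rcases pvNC_cases n with h | h | h | h <;>
    rcases pvPC_cases p with g | g | g | g | g | g | g <;> rw [h, g] <;> decide
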